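-- pv_equiv track=rewrite | github.com/Kontowicz/Daily-coding-problem | day_158.py | solution
-- ===== SOURCE A (Python) =====
-- def solution(array):
--
--     result = []
--
--     for row in array:
--         tmp = []
--         for item in row:
--             if item == 1:
--                 tmp.append(0)
--             else:
--                 tmp.append(1)
--         result.append(tmp)
--
--     for i in range(1, len(result)):
--         for j in range(1, len(result[i])):
--             if result[i][j] == 0:
--                 continue
--             else:
--                 result[i][j] = result[i - 1][j] + result[i][j - 1]
--
--
--     return result[-1][-1]
-- ===== SOURCE B (Python) =====
-- def solution(array):
--     memo = {}
--
--     def count(i, j):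
--         if (i, j) in memo:
--             return memo[(i, j)]
--         if array[i][j] == 1:
--             v = 0
--         elif i == 0 or j == 0:
--             v = 1
--         else:
--             v = count(i - 1, j) + count(i, j - 1)
--         memo[(i, j)] = v
--         return v
--
--     return count(len(array) - 1, len(array[-1]) - 1)
-- ===== Notes on version B (the rewrite author's own statement) =====
-- stated objective: alternative
-- what changed: B replaces A's bottom-up tabulation (invert the whole grid into a second matrix, then mutate it index-wise) by top-down memoized recursion from the bottom-right cell, visiting only cells reachable from the target and never materialising the inverted grid.
import Mathlib
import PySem

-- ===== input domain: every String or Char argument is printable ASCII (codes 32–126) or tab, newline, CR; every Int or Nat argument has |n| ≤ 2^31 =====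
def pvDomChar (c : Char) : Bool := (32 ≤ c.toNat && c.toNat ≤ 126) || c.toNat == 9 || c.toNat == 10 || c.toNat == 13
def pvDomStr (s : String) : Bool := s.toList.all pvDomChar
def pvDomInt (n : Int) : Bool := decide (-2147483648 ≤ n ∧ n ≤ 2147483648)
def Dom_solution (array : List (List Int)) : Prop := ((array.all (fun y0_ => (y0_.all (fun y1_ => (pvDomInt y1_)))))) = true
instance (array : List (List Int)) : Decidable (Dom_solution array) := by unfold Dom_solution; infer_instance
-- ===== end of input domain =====

-- B replaces A's bottom-up tabulation (invert the grid into a second matrix, then mutate it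
-- index-wise) by top-down memoized recursion from the bottom-right cell; same return value.

-- ===== PORT A =====
-- 'tmp' built by one append per item
def pvInvertRow (row : List Int) : List Int :=
  row.foldl (fun tmp item => tmp ++ [if item == 1 then (0 : Int) else 1]) []

-- body of A's inner loop: 'if result[i][j] == 0: continue else: result[i][j] = result[i-1][j] + result[i][j-1]'
def pvAInnerStep (res : List (List Int)) (i j : Int) : List (List Int) :=
  if PySem.List.pyGetD (PySem.List.pyGetD res i []) j 0 == 0 then res
  else
    res.set i.toNat ((PySem.List.pyGetD res i []).set j.toNat
      (PySem.List.pyGetD (PySem.List.pyGetD res (i-1) []) j 0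
        + PySem.List.pyGetD (PySem.List.pyGetD res i []) (j-1) 0))

-- body of A's outer loop: 'for j in range(1, len(result[i])): …'
def pvAOuterStep (res : List (List Int)) (i : Int) : List (List Int) :=
  (PySem.List.pyRange 1 (((PySem.List.pyGetD res i []).length : Int)) 1).foldl
    (fun r j => pvAInnerStep r i j) res

def solution (array : List (List Int)) : Int :=
  let result := array.foldl (fun res row => res ++ [pvInvertRow row]) []
  let result := (PySem.List.pyRange 1 ((result.length : Int)) 1).foldl pvAOuterStep result
  PySem.List.pyGetD (PySem.List.pyGetD result (-1) []) (-1) 0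

-- ===== PORT B =====
-- array[i][j] (in range on every access B makes inside Pre_)
def pvCell (array : List (List Int)) (i j : Int) : Int :=
  PySem.List.pyGetD (PySem.List.pyGetD array i []) j 0

-- the inner 'count' with its dict memo; fuel only makes the recursion structural
-- (the entry call passes fuel > i + j, more than the recursion depth ever reached)
def pvCount (array : List (List Int)) :
    Nat → Int → Int → PySem.Dict (Int × Int) Int → Int × PySem.Dict (Int × Int) Int
  | 0, _, _, memo => (0, memo)
  | fuel+1, i, j, memo =>
    match memo.get? (i, j) with
    | some v => (v, memo)
    | none =>
      if pvCell array i j == 1 then (0, memo.insert (i, j) 0)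
      else if i == 0 || j == 0 then (1, memo.insert (i, j) 1)
      else
        let r1 := pvCount array fuel (i - 1) j memo
        let r2 := pvCount array fuel i (j - 1) r1.2
        (r1.1 + r2.1, r2.2.insert (i, j) (r1.1 + r2.1))

def solution_alt (array : List (List Int)) : Int :=
  let i : Int := (array.length : Int) - 1
  let j : Int := ((PySem.List.pyGetD array (-1) []).length : Int) - 1
  (pvCount array (i + j + 2).toNat i j PySem.Dict.empty).1

-- ===== PRECONDITION & SPEC =====
-- Pre_ is exactly where Python A returns: a nonempty array whose last row is nonempty
-- (else 'result[-1][-1]' raises IndexError), and where every DP cell that is actually recomputed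
-- (i,j ≥ 1 with array[i][j] ≠ 1) has a cell above it ('result[i-1][j]' raises IndexError otherwise).
def Pre_solution (array : List (List Int)) : Prop :=
  array ≠ [] ∧ (array.getLast?.getD []) ≠ [] ∧
  ∀ i < array.length, ∀ j < (array.getD i []).length,
    1 ≤ i → 1 ≤ j → (array.getD i []).getD j 0 ≠ 1 → j < (array.getD (i-1) []).length
instance (array : List (List Int)) : Decidable (Pre_solution array) := by
  unfold Pre_solution; infer_instance

def pvWitness_solution : List (List Int) := ([[0, 1], [1, 0]])

def Spec_solution (array : List (List Int)) (out : Int) : Prop := out = solution_alt array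
instance (array : List (List Int)) (out : Int) : Decidable (Spec_solution array out) := by
  unfold Spec_solution; infer_instance

-- ===== CLAIM (what is proved, stated in full; the proofs are below) =====
def Claim_equal_solution : Prop := ∀ (array : List (List Int)), Dom_solution array → Pre_solution array → Spec_solution array (solution array)

-- ===== LEMMAS AND PROOFS =====

-- the specification value of a cell, by recursion on i + j
def pvG (array : List (List Int)) : Nat → Nat → Int
  | i, j =>
    if pvCell array (i : Int) (j : Int) == 1 then 0
    else if i = 0 ∨ j = 0 then 1
    else pvG array (i-1) j + pvG array i (j-1)
termination_by i j => i + j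
decreasing_by all_goals omega

-- every natural-indexed entry of the memo is the spec value
def pvMemoOK (array : List (List Int)) (memo : PySem.Dict (Int × Int) Int) : Prop :=
  ∀ (a b : Nat) (v : Int), memo.get? ((a : Int), (b : Int)) = some v → v = pvG array a b

lemma pvMemoOK_insert (array : List (List Int)) (memo : PySem.Dict (Int × Int) Int)
    (hm : pvMemoOK array memo) (a b : Nat) (v : Int) (hv : v = pvG array a b) :
    pvMemoOK array (memo.insert ((a : Int), (b : Int)) v) := by
  intro a' b' v' h
  rw [PySem.Dict.get?_insert] at h
  split at h
  · rename_i he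
    have ha : a' = a := by simpa using congrArg Prod.fst he
    have hb : b' = b := by simpa using congrArg Prod.snd he
    cases h
    rw [ha, hb, ← hv]
  · exact hm a' b' v' h

lemma pvCount_correct (array : List (List Int)) : ∀ (fuel : Nat) (a b : Nat)
    (memo : PySem.Dict (Int × Int) Int), a + b < fuel → pvMemoOK array memo →
    (pvCount array fuel (a : Int) (b : Int) memo).1 = pvG array a b ∧
    pvMemoOK array (pvCount array fuel (a : Int) (b : Int) memo).2 := by
  intro fuel
  induction fuel with
  | zero => intro a b memo h _; omega
  | succ fuel ih =>
    intro a b memo h hmem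
    cases hm : memo.get? ((a : Int), (b : Int)) with
    | some v =>
      simp only [pvCount, hm]
      exact ⟨hmem a b v hm, hmem⟩
    | none =>
      simp only [pvCount, hm]
      by_cases hcell : (pvCell array (a : Int) (b : Int) == 1) = true
      · rw [if_pos hcell]
        refine ⟨by rw [pvG, if_pos hcell], ?_⟩
        exact pvMemoOK_insert array memo hmem a b 0 (by rw [pvG, if_pos hcell])
      · rw [if_neg hcell]
        by_cases hz : a = 0 ∨ b = 0
        · have hzb : (((a : Int) == 0) || ((b : Int) == 0)) = true := by
            rcases hz with hz | hz <;> simp [hz]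
          rw [if_pos hzb]
          refine ⟨by rw [pvG, if_neg hcell, if_pos hz], ?_⟩
          exact pvMemoOK_insert array memo hmem a b 1 (by rw [pvG, if_neg hcell, if_pos hz])
        · have hzb : ¬((((a : Int) == 0) || ((b : Int) == 0)) = true) := by
            push Not at hz ⊢
            simp [hz.1, hz.2]
          rw [if_neg hzb]
          have ha1 : (a : Int) - 1 = ((a - 1 : Nat) : Int) := by omega
          have hb1 : (b : Int) - 1 = ((b - 1 : Nat) : Int) := by omega
          dsimp only
          rw [ha1, hb1]
          obtain ⟨e1, m1⟩ := ih (a - 1) b memo (by omega) hmem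
          obtain ⟨e2, m2⟩ := ih a (b - 1) (pvCount array fuel ((a - 1 : Nat) : Int) (b : Int) memo).2
            (by omega) m1
          have hval : (pvCount array fuel ((a - 1 : Nat) : Int) (b : Int) memo).1
              + (pvCount array fuel (a : Int) ((b - 1 : Nat) : Int)
                  (pvCount array fuel ((a - 1 : Nat) : Int) (b : Int) memo).2).1
              = pvG array a b := by
            have hG : pvG array a b = pvG array (a - 1) b + pvG array a (b - 1) := by
              rw [pvG, if_neg hcell, if_neg hz]
            rw [e1, e2, hG]
          exact ⟨hval, pvMemoOK_insert array _ m2 a b _ hval⟩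

-- ---- A-side machinery: the inverted value, A's in-place loops as row operations ----
def pvInvF (x : Int) : Int := if x == 1 then 0 else 1
def pvRowInv (row : List Int) : List Int := row.map pvInvF

-- A's inner-loop body acting on row i alone
def pvRowStep (p l : List Int) (j : Int) : List Int :=
  if PySem.List.pyGetD l j 0 == 0 then l
  else l.set j.toNat (PySem.List.pyGetD p j 0 + PySem.List.pyGetD l (j-1) 0)

-- one finished DP row, as the fold of pvBStep over the enumerated original row
def pvBStep (prev : List Int) (cur : List Int) (ji : Int × Int) : List Int :=
  let inv : Int := if ji.2 == 1 then 0 else 1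
  if decide (1 ≤ ji.1) && inv != 0 then
    cur ++ [PySem.List.pyGetD prev ji.1 0 + PySem.List.pyGetD cur (ji.1 - 1) 0]
  else
    cur ++ [inv]

def pvBRow (prev : List Int) (row : List Int) : List Int :=
  (PySem.List.enumerate row).foldl (pvBStep prev) []

-- B's partial row: the first t steps of the fold
def pvBTake (p : List Int) (row : List Int) (t : Nat) : List Int :=
  ((PySem.List.enumerate row).take t).foldl (pvBStep p) []

-- the chain of finished DP rows
def pvDP (array : List (List Int)) : Nat → List Int
  | 0 => pvRowInv (array.getD 0 [])
  | (i+1) => pvBRow (pvDP array i) (array.getD (i+1) [])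

lemma pvInvertRow_eq (row : List Int) : pvInvertRow row = pvRowInv row := by
  rw [pvInvertRow, PySem.List.foldl_append_singleton_eq_map]; rfl

lemma pvGetD_natCast' (res : List (List Int)) (n : Nat) :
    PySem.List.pyGetD res (n : Int) [] = res.getD n [] := by
  simp [PySem.List.pyGetD_natCast]

lemma step_as_row (res : List (List Int)) (i : Nat) (j : Int) (h1 : 1 ≤ i) (h2 : i < res.length) :
    pvAInnerStep res (i : Int) j
      = res.set i (pvRowStep (res.getD (i-1) []) (res.getD i []) j) := by
  have hc : ((i : Int)) - 1 = ((i - 1 : Nat) : Int) := by omega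
  unfold pvAInnerStep pvRowStep
  rw [hc, pvGetD_natCast', pvGetD_natCast']
  split
  · rw [List.getD_eq_getElem _ _ h2, List.set_getElem_self]
  · simp

lemma pvInner_as_row (js : List Int) (res : List (List Int)) (i : Nat)
    (h1 : 1 ≤ i) (h2 : i < res.length) :
    js.foldl (fun r j => pvAInnerStep r (i : Int) j) res
      = res.set i (js.foldl (pvRowStep (res.getD (i-1) [])) (res.getD i [])) := by
  induction js generalizing res with
  | nil =>
    rw [List.foldl_nil, List.foldl_nil, List.getD_eq_getElem _ _ h2, List.set_getElem_self]
  | cons j js ih =>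
    rw [List.foldl_cons, List.foldl_cons, step_as_row res i j h1 h2]
    set res' := res.set i (pvRowStep (res.getD (i-1) []) (res.getD i []) j) with hres'
    rw [ih res' (by simp [hres', h2])]
    have e1 : res'.getD (i-1) [] = res.getD (i-1) [] := by
      have hne : i ≠ i - 1 := by omega
      simp [hres', List.getD, List.getElem?_set_ne hne]
    have e2 : res'.getD i [] = pvRowStep (res.getD (i-1) []) (res.getD i []) j := by
      rw [hres', List.getD_eq_getElem _ _ (by simpa using h2)]; simp [h2]
    rw [e1, e2, hres', List.set_set]

lemma pvBStep_length (pr : List Int) (cur : List Int) (ji : Int × Int) :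
    (pvBStep pr cur ji).length = cur.length + 1 := by
  unfold pvBStep; dsimp only; split <;> (try split) <;> simp
lemma pvEnumerate_getElem? (row : List Int) (s : Int) (t : Nat) (ht : t < row.length) :
    (PySem.List.enumerate row s)[t]? = some (s + t, row[t]) := by
  induction row generalizing s t with
  | nil => simp at ht
  | cons x xs ih =>
    rw [PySem.List.enumerate_cons]
    cases t with
    | zero => simp
    | succ t =>
      simp only [List.getElem?_cons_succ]
      rw [ih (s+1) t (by simpa using ht)]
      simp only [Option.some.injEq, Prod.mk.injEq]
      constructor
      · push_cast; ring
      · rfl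
lemma pvBTake_succ (p row : List Int) (t : Nat) (ht : t < row.length) :
    pvBTake p row (t+1) = pvBStep p (pvBTake p row t) ((t : Int), row[t]) := by
  unfold pvBTake
  rw [List.take_add_one, pvEnumerate_getElem? row 0 t ht]
  simp
lemma pvBTake_length (p row : List Int) : ∀ (t : Nat), t ≤ row.length →
    (pvBTake p row t).length = t := by
  intro t
  induction t with
  | zero => intro _; simp [pvBTake]
  | succ t ih =>
    intro ht
    rw [pvBTake_succ p row t (by omega), pvBStep_length, ih (by omega)]
lemma pvBTake_full (p row : List Int) : pvBTake p row row.length = pvBRow p row := by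
  unfold pvBTake pvBRow
  rw [List.take_of_length_le (by simp [PySem.List.length_enumerate])]

-- the value appended at step j never changes afterwards
lemma pvBTake_stable (p row : List Int) (j : Nat) : ∀ (t : Nat), j + 1 ≤ t → t ≤ row.length →
    (pvBTake p row t).getD j 0 = (pvBTake p row (j+1)).getD j 0 := by
  intro t
  induction t with
  | zero => intro h _; omega
  | succ t ih =>
    intro h1 h2
    by_cases he : j + 1 = t + 1
    · rw [he]
    · rw [pvBTake_succ p row t (by omega)]
      have hlen : (pvBTake p row t).length = t := pvBTake_length p row t (by omega)
      have hjt : j < t := by omega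
      unfold pvBStep
      dsimp only
      split <;> (try split) <;>
        rw [List.getD_append _ _ _ _ (by omega), ih (by omega) (by omega)]

-- the finished row, read at index j
lemma pvBRow_getD (p row : List Int) (j : Nat) (hj : j < row.length) :
    (pvBRow p row).getD j 0 =
      if pvInvF row[j] = 0 ∨ j = 0 then pvInvF row[j]
      else PySem.List.pyGetD p (j : Int) 0 + (pvBRow p row).getD (j-1) 0 := by
  have hfull : ∀ t, t < row.length → (pvBRow p row).getD t 0 = (pvBTake p row (t+1)).getD t 0 := by
    intro t ht
    rw [← pvBTake_full]
    exact pvBTake_stable p row t row.length (by omega) (le_refl _)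
  have hlen : (pvBTake p row j).length = j := pvBTake_length p row j (by omega)
  rw [hfull j hj, pvBTake_succ p row j hj]
  unfold pvBStep
  dsimp only
  by_cases h0 : pvInvF row[j] = 0
  · have hr0 : (if row[j] == 1 then (0:Int) else 1) = 0 := by simpa [pvInvF] using h0
    have hre : row[j] = 1 := by by_contra hne; simp [hne] at hr0
    rw [hr0, if_neg (by simp), List.getD_append_right _ _ _ _ (by omega), hlen]
    simp [hre, pvInvF]
  · by_cases hz : j = 0
    · subst hz
      rw [if_neg (by simp), List.getD_append_right _ _ _ _ (by omega), hlen]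
      simp [pvInvF]
    · have hr1 : ((if row[j] == 1 then (0:Int) else 1) != 0) = true := by
        have : ¬row[j] = 1 := by intro e; exact h0 (by simp [pvInvF, e])
        simp [this]
      rw [if_pos (by rw [hr1]; simp; omega), List.getD_append_right _ _ _ _ (by omega), hlen]
      rw [Nat.sub_self, List.getD_cons_zero, if_neg (by push Not; exact ⟨h0, hz⟩)]
      have hc : ((j:Nat):Int) - 1 = ((j-1:Nat):Int) := by omega
      rw [hc, PySem.List.pyGetD_natCast]
      congr 1
      have h2 : (pvBTake p row j).getD (j-1) 0 = (pvBRow p row).getD (j-1) 0 := by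
        rw [hfull (j-1) (by omega), show j - 1 + 1 = j by omega]
      simpa [List.getD] using h2

lemma pvBRow_length (p row : List Int) : (pvBRow p row).length = row.length := by
  rw [← pvBTake_full]; exact pvBTake_length p row row.length (le_refl _)

lemma pvDP_length (array : List (List Int)) (i : Nat) :
    (pvDP array i).length = (array.getD i []).length := by
  cases i with
  | zero => simp [pvDP, pvRowInv]
  | succ i => rw [pvDP, pvBRow_length]

-- the DP rows are pointwise the spec values (inside Pre_)
lemma pvDP_getD (array : List (List Int)) (hpre : Pre_solution array) :
    ∀ (i : Nat), i < array.length → ∀ (j : Nat), j < (array.getD i []).length →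
    (pvDP array i).getD j 0 = pvG array i j := by
  obtain ⟨-, -, hidx⟩ := hpre
  intro i
  induction i with
  | zero =>
    intro _ j hj
    have hcell : pvCell array ((0:Nat):Int) ((j:Nat):Int) = (array.getD 0 []).getD j 0 := by
      rw [pvCell, pvGetD_natCast', PySem.List.pyGetD_natCast]
    rw [pvDP, pvRowInv, List.getD_eq_getElem _ _ (by simpa using hj), List.getElem_map,
      pvG, hcell, List.getD_eq_getElem _ _ hj, pvInvF]
    split
    · rfl
    · rw [if_pos (Or.inl rfl)]
  | succ i ihi =>
    intro hi j hj
    induction j with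
    | zero =>
      have hrowj : (array.getD (i+1) [])[0] = (array.getD (i+1) []).getD 0 0 :=
        (List.getD_eq_getElem _ _ hj).symm
      have hcell : pvCell array ((i+1:Nat):Int) ((0:Nat):Int) = (array.getD (i+1) []).getD 0 0 := by
        rw [pvCell, pvGetD_natCast', PySem.List.pyGetD_natCast]
      rw [pvDP, pvBRow_getD _ _ 0 hj, pvG, hcell]
      by_cases hc : (array.getD (i+1) []).getD 0 0 = 1
      · rw [if_pos (Or.inl (by rw [hrowj, hc, pvInvF]; simp)), if_pos (by simpa using hc),
          hrowj, hc, pvInvF]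
        simp
      · rw [if_pos (Or.inr rfl), if_neg (by simpa using hc), if_pos (Or.inr rfl),
          hrowj, pvInvF, if_neg (by simpa using hc)]
    | succ t iht =>
      have hrowj : (array.getD (i+1) [])[t+1] = (array.getD (i+1) []).getD (t+1) 0 :=
        (List.getD_eq_getElem _ _ hj).symm
      have hcell : pvCell array ((i+1:Nat):Int) ((t+1:Nat):Int)
          = (array.getD (i+1) []).getD (t+1) 0 := by
        rw [pvCell, pvGetD_natCast', PySem.List.pyGetD_natCast]
      rw [pvDP, pvBRow_getD _ _ (t+1) hj, pvG, hcell]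
      by_cases hc : (array.getD (i+1) []).getD (t+1) 0 = 1
      · rw [if_pos (Or.inl (by rw [hrowj, hc, pvInvF]; simp)), if_pos (by simpa using hc),
          hrowj, hc, pvInvF]
        simp
      · have hup : t + 1 < (array.getD i []).length := by
          have := hidx (i+1) hi (t+1) hj (by omega) (by omega) hc
          simpa using this
        have hc' : ¬(array.getD (i+1) [])[t+1] = 1 := by rw [hrowj]; exact hc
        rw [if_neg (by push Not; exact ⟨by simp [pvInvF]; simpa [List.getD] using hc', by omega⟩),
          if_neg (by simpa using hc), if_neg (by push Not; exact ⟨by omega, by omega⟩)]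
        rw [PySem.List.pyGetD_natCast, ihi (by omega) (t+1) hup]
        have h2 : (pvDP array (i+1)).getD t 0 = pvG array (i+1) t := by
          rw [pvDP] at iht ⊢
          exact iht (by omega)
        rw [show t + 1 - 1 = t by omega, pvDP] at *
        rw [h2]
        norm_num

lemma pvMap_getD (arr : List (List Int)) (i : Nat) (h : i < arr.length) :
    (arr.map pvRowInv).getD i [] = pvRowInv (arr.getD i []) := by
  rw [List.getD_eq_getElem _ _ (by simpa using h), List.getD_eq_getElem _ _ h, List.getElem_map]

lemma pvSet_getD_self (r : List (List Int)) (n : Nat) (v : List Int) (h : n < r.length) :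
    (r.set n v).getD n [] = v := by
  rw [List.getD_eq_getElem _ _ (by simpa using h)]; simp

lemma pvSet_getD_ne (r : List (List Int)) (n i : Nat) (v : List Int) (h : n ≠ i) :
    (r.set n v).getD i [] = r.getD i [] := by
  simp [List.getD, List.getElem?_set_ne h]

lemma pvRow_bridge_aux (p row : List Int) : ∀ (k : Nat), k < row.length →
    (PySem.List.pyRange 1 ((k : Int) + 1) 1).foldl (pvRowStep p) (pvRowInv row)
      = pvBTake p row (k+1) ++ (pvRowInv row).drop (k+1) := by
  intro k
  induction k with
  | zero =>
    intro hk
    rw [show ((0:Nat):Int) + 1 = 1 by norm_num, PySem.List.pyRange_one_eq_nil (by norm_num),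
      List.foldl_nil, pvBTake_succ p row 0 hk]
    have h0 : 0 < (pvRowInv row).length := by simpa [pvRowInv] using hk
    rw [show pvRowInv row = (pvRowInv row).take 0 ++ (pvRowInv row).drop 0 by simp,
      List.drop_eq_getElem_cons h0]
    simp [pvBStep, pvBTake, pvRowInv, pvInvF]
  | succ k ih =>
    intro hk
    have hk' : k < row.length := by omega
    have hlen : (pvBTake p row (k+1)).length = k + 1 := pvBTake_length p row (k+1) (by omega)
    have hinvlen : k + 1 < (pvRowInv row).length := by simpa [pvRowInv]
    rw [show ((k+1:Nat):Int) + 1 = (((k:Nat):Int) + 1) + 1 by push_cast; ring,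
      PySem.List.pyRange_one_succ_right (by omega), List.foldl_append, List.foldl_cons,
      List.foldl_nil, ih hk']
    rw [List.drop_eq_getElem_cons hinvlen]
    have hinv : (pvRowInv row)[k+1] = pvInvF row[k+1] := by simp [pvRowInv]
    have hidx : ((k:Nat):Int) + 1 = ((k+1:Nat):Int) := by push_cast; ring
    -- read at k+1 lands on the head of the dropped part
    have hread : PySem.List.pyGetD
        (pvBTake p row (k+1) ++ (pvRowInv row)[k+1] :: (pvRowInv row).drop (k+1+1))
        (((k:Nat):Int) + 1) 0 = pvInvF row[k+1] := by
      rw [hidx, PySem.List.pyGetD_natCast,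
        List.getD_append_right _ _ _ _ (by omega), hlen]
      simp [hinv]
    rw [pvBTake_succ p row (k+1) hk]
    unfold pvRowStep pvBStep
    dsimp only
    by_cases hz : pvInvF row[k+1] = 0
    · rw [if_pos (by rw [hread, hz]; rfl)]
      have hr0 : (if row[k+1] == 1 then (0:Int) else 1) = 0 := by simpa [pvInvF] using hz
      rw [hr0]
      have hg : ¬((decide (1 ≤ ((k+1:Nat):Int)) && ((0:Int) != 0)) = true) := by
        simp
      rw [if_neg hg, hinv, hz, List.append_cons]
    · rw [if_neg (by rw [hread]; simp [hz])]
      have hr1 : ¬row[k+1] = 1 := by intro e; exact hz (by simp [pvInvF, e])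
      rw [if_pos (by simp [hr1])]
      have htoNat : (((k:Nat):Int) + 1).toNat = k + 1 := by omega
      rw [htoNat, List.set_append_right _ _ (by omega), hlen]
      have hsub : k + 1 - (k+1) = 0 := by omega
      rw [hsub, List.set_cons_zero]
      have hprev1 : (((k+1:Nat):Int)) - 1 = ((k:Nat):Int) := by push_cast; ring
      have hreadk : PySem.List.pyGetD
          (pvBTake p row (k+1) ++ (pvRowInv row)[k+1] :: (pvRowInv row).drop (k+1+1))
          ((((k:Nat):Int) + 1) - 1) 0 = PySem.List.pyGetD (pvBTake p row (k+1)) ((k:Nat):Int) 0 := by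
        rw [show (((k:Nat):Int) + 1) - 1 = ((k:Nat):Int) by ring, PySem.List.pyGetD_natCast,
          PySem.List.pyGetD_natCast, List.getD_append _ _ _ _ (by omega)]
      rw [hreadk, hidx, hprev1, List.append_cons]

-- A's in-place row update equals pvBRow
lemma pvRow_bridge (p row : List Int) :
    (PySem.List.pyRange 1 ((row.length : Int)) 1).foldl (pvRowStep p) (pvRowInv row)
      = pvBRow p row := by
  cases h : row.length with
  | zero =>
    have : row = [] := List.eq_nil_of_length_eq_zero h
    subst this
    simp [pvRowInv, pvBRow, PySem.List.enumerate_nil, PySem.List.pyRange_one_eq_nil]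
  | succ m =>
    rw [show ((m+1:Nat):Int) = ((m:Nat):Int) + 1 by push_cast; ring,
      pvRow_bridge_aux p row m (by omega)]
    have h2 : (pvRowInv row).drop (m+1) = [] := by
      apply List.drop_eq_nil_of_le; simp [pvRowInv, h]
    rw [h2, List.append_nil, show m + 1 = row.length from h.symm, pvBTake_full]

lemma pvOuter (array : List (List Int)) : ∀ (k : Nat), k < array.length →
    ((PySem.List.pyRange 1 ((k : Int) + 1) 1).foldl pvAOuterStep (array.map pvRowInv)).length
        = array.length
    ∧ ∀ i : Nat, ((PySem.List.pyRange 1 ((k : Int) + 1) 1).foldl pvAOuterStep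
          (array.map pvRowInv)).getD i []
        = if i ≤ k then pvDP array i else (array.map pvRowInv).getD i [] := by
  intro k
  induction k with
  | zero =>
    intro hk
    rw [show ((0:Nat):Int) + 1 = 1 by norm_num, PySem.List.pyRange_one_eq_nil (by norm_num),
      List.foldl_nil]
    refine ⟨by simp, fun i => ?_⟩
    by_cases hi : i ≤ 0
    · rw [if_pos hi, show i = 0 by omega, pvDP, pvMap_getD array 0 (by omega)]
    · rw [if_neg hi]
  | succ k ih =>
    intro hk
    obtain ⟨ihl, ihg⟩ := ih (by omega)
    rw [show ((k+1:Nat):Int) + 1 = (((k:Nat):Int) + 1) + 1 by push_cast; ring,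
      PySem.List.pyRange_one_succ_right (by omega), List.foldl_append, List.foldl_cons,
      List.foldl_nil]
    set r := (PySem.List.pyRange 1 ((k : Int) + 1) 1).foldl pvAOuterStep (array.map pvRowInv)
      with hr
    have hcast : ((k:Nat):Int) + 1 = ((k+1:Nat):Int) := by push_cast; ring
    have hget : PySem.List.pyGetD r (((k:Nat):Int) + 1) [] = pvRowInv (array.getD (k+1) []) := by
      rw [hcast, PySem.List.pyGetD_natCast, ihg (k+1), if_neg (by omega),
        pvMap_getD array (k+1) hk]
    have hstep : pvAOuterStep r (((k:Nat):Int) + 1) = r.set (k+1) (pvDP array (k+1)) := by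
      rw [pvAOuterStep, hget, hcast, pvInner_as_row _ r (k+1) (by omega) (by rw [ihl]; omega)]
      congr 1
      have e1 : r.getD (k+1-1) [] = pvDP array k := by
        rw [show k+1-1 = k by omega, ihg k, if_pos (le_refl k)]
      have e2 : r.getD (k+1) [] = pvRowInv (array.getD (k+1) []) := by
        rw [ihg (k+1), if_neg (by omega), pvMap_getD array (k+1) hk]
      rw [e1, e2, show ((pvRowInv (array.getD (k+1) [])).length : Int)
          = (((array.getD (k+1) []).length : Int)) by simp [pvRowInv], pvRow_bridge]
      rfl
    rw [hstep]
    refine ⟨by simpa using ihl, fun i => ?_⟩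
    by_cases hik : i = k+1
    · subst hik
      rw [pvSet_getD_self r (k+1) _ (by rw [ihl]; omega), if_pos (le_refl _)]
    · rw [pvSet_getD_ne r (k+1) i _ (fun e => hik e.symm), ihg i]
      by_cases hle : i ≤ k
      · rw [if_pos hle, if_pos (by omega)]
      · rw [if_neg hle, if_neg (by omega)]

lemma pv_main (array : List (List Int)) (hpre : Pre_solution array) :
    solution array = solution_alt array := by
  obtain ⟨hne, hlast, hidx⟩ := hpre
  have hm : 1 ≤ array.length := List.length_pos_of_ne_nil hne
  have hlastget : array.getLast?.getD [] = array.getD (array.length - 1) [] := by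
    rw [List.getLast?_eq_getElem?]
    simp [List.getD]
  have hrow : array.getD (array.length - 1) [] ≠ [] := by rw [← hlastget]; exact hlast
  have hn : 1 ≤ (array.getD (array.length - 1) []).length := List.length_pos_of_ne_nil hrow
  -- A's side
  unfold solution
  rw [PySem.List.foldl_append_singleton_eq_map]
  dsimp only
  rw [List.nil_append,
    show array.map pvInvertRow = array.map pvRowInv by simp [pvInvertRow_eq]]
  have hN : (((array.map pvRowInv).length) : Int) = ((array.length - 1 : Nat) : Int) + 1 := by
    simp; omega
  rw [hN]
  obtain ⟨hL, hG⟩ := pvOuter array (array.length - 1) (by omega)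
  set R := (PySem.List.pyRange 1 (((array.length - 1 : Nat) : Int) + 1) 1).foldl pvAOuterStep
    (array.map pvRowInv) with hR
  have hRne : R ≠ [] := by
    intro e
    rw [e] at hL
    simp at hL
    omega
  rw [PySem.List.pyGetD_neg_one _ _ hRne]
  have hRlast : R.getLast hRne = pvDP array (array.length - 1) := by
    rw [List.getLast_eq_getElem, ← List.getD_eq_getElem _ _ (by omega), hG (R.length - 1), hL]
    rw [if_pos (by omega)]
  rw [hRlast]
  have hDPlen : (pvDP array (array.length - 1)).length
      = (array.getD (array.length - 1) []).length := pvDP_length array (array.length - 1)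
  have hDPne : pvDP array (array.length - 1) ≠ [] := by
    intro e
    have h0 : (pvDP array (array.length - 1)).length = 0 := by rw [e]; rfl
    rw [hDPlen] at h0
    omega
  rw [PySem.List.pyGetD_neg_one _ _ hDPne]
  have hAval : (pvDP array (array.length - 1)).getLast hDPne
      = pvG array (array.length - 1) ((array.getD (array.length - 1) []).length - 1) := by
    rw [List.getLast_eq_getElem, ← List.getD_eq_getElem _ _ (by omega)]
    rw [hDPlen]
    exact pvDP_getD array ⟨hne, hlast, hidx⟩ (array.length - 1) (by omega)
      ((array.getD (array.length - 1) []).length - 1) (by omega)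
  rw [hAval]
  -- B's side
  unfold solution_alt
  dsimp only
  rw [show PySem.List.pyGetD array (-1) [] = array.getD (array.length - 1) [] by
    rw [PySem.List.pyGetD_neg_one _ _ hne, List.getLast_eq_getElem,
      ← List.getD_eq_getElem _ _ (by omega)]]
  have hi : (array.length : Int) - 1 = ((array.length - 1 : Nat) : Int) := by omega
  have hj : ((array.getD (array.length - 1) []).length : Int) - 1
      = (((array.getD (array.length - 1) []).length - 1 : Nat) : Int) := by omega
  rw [hi, hj]
  have hfuel : (((array.length - 1 : Nat) : Int)
      + (((array.getD (array.length - 1) []).length - 1 : Nat) : Int) + 2).toNat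
      = (array.length - 1) + ((array.getD (array.length - 1) []).length - 1) + 2 := by omega
  rw [hfuel]
  have hempty : pvMemoOK array PySem.Dict.empty := by
    intro a b v h
    rw [PySem.Dict.get?_empty] at h
    cases h
  obtain ⟨he, -⟩ := pvCount_correct array
    ((array.length - 1) + ((array.getD (array.length - 1) []).length - 1) + 2)
    (array.length - 1) ((array.getD (array.length - 1) []).length - 1)
    PySem.Dict.empty (by omega) hempty
  rw [he]

-- ===== VERDICT (by name: the statement is the Claim_ definition above) =====
theorem solution_spec : Claim_equal_solution := by
  intro array _ hpre
  unfold Spec_solution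
  exact pv_main array hpre
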